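-- pv_equiv track=rewrite | github.com/MadTown86/leetcode_problems | 409_longest_palindrome.py | longestPalindrome2
-- ===== SOURCE A (Python) =====
-- from collections import defaultdict
--
-- def longestPalindrome2(s: str) -> int:
--     """
--     Good Answer but don't need to actually build the palindrome.  So going to refactor
--     """
--     d = defaultdict(int)
--     for x in s:
--         d[x] += 1
--     f, m, b = "", "", ""
--     d_copy = d.copy()
--     odd = {}
--     for x, y in d.items():
--         if y % 2 == 0:
--             f = (x * (y // 2)) + f
--             b += x * (y // 2)
--         else:
--             odd[x] = y
--             d_copy.pop(x)
--
--     if len(odd.keys()) <= 1: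
--         for x, y in odd.items():
--             m += x * y
--
--     elif odd:
--         first = [x for x in odd.keys()][0]
--         for x, y in odd.items():
--             if odd[first] < y:
--                 first = x
--         m += first * odd[first]
--         odd.pop(first)
--
--         for x, y in odd.items():
--             if y > 2:
--                 odd_toeven = y - 1
--                 count = odd_toeven // 2
--                 f = count * x + f
--                 b += count * x
--
--     return len(f + m + b)
-- ===== SOURCE B (Python) =====
-- from collections import Counter
--
-- def longestPalindrome2(s: str) -> int:
--     c = Counter(s)
--     pairs = sum(v // 2 for v in c.values())
--     return 2 * pairs + (1 if any(v % 2 for v in c.values()) else 0)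
-- ===== Notes on version B (the rewrite author's own statement) =====
-- stated objective: faster
-- what changed: B replaces A's construction of the actual palindrome strings (building f, m, b by repeated string concatenation, an odd-count dict, an argmax scan and a second fixup loop, then taking len) with a direct count: 2*sum(count//2) over the Counter plus 1 if any count is odd.
import Mathlib
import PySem

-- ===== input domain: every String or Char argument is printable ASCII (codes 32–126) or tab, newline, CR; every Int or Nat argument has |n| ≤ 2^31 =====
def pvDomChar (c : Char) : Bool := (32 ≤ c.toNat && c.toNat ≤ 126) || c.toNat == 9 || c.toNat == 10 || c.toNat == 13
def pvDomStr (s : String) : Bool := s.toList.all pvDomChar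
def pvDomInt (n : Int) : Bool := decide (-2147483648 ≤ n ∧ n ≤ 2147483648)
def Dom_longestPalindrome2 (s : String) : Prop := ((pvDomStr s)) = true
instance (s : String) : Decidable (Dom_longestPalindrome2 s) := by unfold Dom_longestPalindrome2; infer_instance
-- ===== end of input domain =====

-- B replaces A's construction of the palindrome strings (f/m/b concatenation, odd dict,
-- argmax scan, fixup loop, then len) with the direct count 2*Σ(count//2) + (1 if any odd).


-- ===== PORT A =====
-- Python str 'x * n' (char repeated n times; empty for n ≤ 0 — .toNat matches that)
def pvRep (n : Int) (c : Char) : List Char := List.replicate n.toNat c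

-- body of 'for x, y in d.items():' — state (f, b, odd, d_copy), each component updated as in A
def pvStepA (st : List Char × List Char × PySem.Dict Char Int × PySem.Dict Char Int)
    (p : Char × Int) : List Char × List Char × PySem.Dict Char Int × PySem.Dict Char Int :=
  (if PySem.Int.mod p.2 2 = 0 then pvRep (PySem.Int.floordiv p.2 2) p.1 ++ st.1 else st.1,
   if PySem.Int.mod p.2 2 = 0 then st.2.1 ++ pvRep (PySem.Int.floordiv p.2 2) p.1 else st.2.1,
   if PySem.Int.mod p.2 2 = 0 then st.2.2.1 else st.2.2.1.insert p.1 p.2,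
   if PySem.Int.mod p.2 2 = 0 then st.2.2.2 else st.2.2.2.erase p.1)  -- d_copy.pop(x): key present, so = erase

def longestPalindrome2 (s : String) : Int :=
  let d := PySem.Dict.counter s.toList            -- d = defaultdict(int); for x in s: d[x] += 1
  let st := d.items.foldl pvStepA ([], [], PySem.Dict.empty, d)
  let f := st.1
  let b := st.2.1
  let odd := st.2.2.1
  if odd.size ≤ 1 then
    let m := odd.items.foldl (fun m p => m ++ pvRep p.2 p.1) ([] : List Char)
    ((f ++ m ++ b).length : Int)
  else
    -- '[x for x in odd.keys()][0]': odd is nonempty on this branch, headD's default is unreachable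
    let first := odd.items.foldl
      (fun first p => if odd.getD first 0 < p.2 then p.1 else first) (odd.keys.headD ' ')
    let m := ([] : List Char) ++ pvRep (odd.getD first 0) first
    let odd2 := odd.erase first                    -- odd.pop(first)
    let st2 := odd2.items.foldl (fun (fb : List Char × List Char) p =>
        (if 2 < p.2 then pvRep (PySem.Int.floordiv (p.2 - 1) 2) p.1 ++ fb.1 else fb.1,
         if 2 < p.2 then fb.2 ++ pvRep (PySem.Int.floordiv (p.2 - 1) 2) p.1 else fb.2)) (f, b)
    ((st2.1 ++ m ++ st2.2).length : Int)

-- ===== PORT B =====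
def longestPalindrome2_alt (s : String) : Int :=
  let c := PySem.Dict.counter s.toList             -- Counter(s)
  let pairs := (c.values.map (fun v => PySem.Int.floordiv v 2)).sum
  2 * pairs + (if c.values.any (fun v => PySem.Int.mod v 2 != 0) then 1 else 0)

-- ===== PRECONDITION & SPEC =====
def Spec_longestPalindrome2 (s : String) (out : Int) : Prop := out = longestPalindrome2_alt s
instance (s : String) (out : Int) : Decidable (Spec_longestPalindrome2 s out) := by unfold Spec_longestPalindrome2; infer_instance

-- ===== CLAIM (what is proved, stated in full; the proofs are below) =====
def Claim_equal_longestPalindrome2 : Prop := ∀ (s : String), Dom_longestPalindrome2 s → Spec_longestPalindrome2 s (longestPalindrome2 s)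

-- ===== LEMMAS AND PROOFS =====

-- the four components of A's first loop, as independent folds
def pvFF (f : List Char) (p : Char × Int) : List Char :=
  if PySem.Int.mod p.2 2 = 0 then pvRep (PySem.Int.floordiv p.2 2) p.1 ++ f else f
def pvFB (b : List Char) (p : Char × Int) : List Char :=
  if PySem.Int.mod p.2 2 = 0 then b ++ pvRep (PySem.Int.floordiv p.2 2) p.1 else b
def pvFO (o : PySem.Dict Char Int) (p : Char × Int) : PySem.Dict Char Int :=
  if PySem.Int.mod p.2 2 = 0 then o else o.insert p.1 p.2
def pvFD (dc : PySem.Dict Char Int) (p : Char × Int) : PySem.Dict Char Int :=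
  if PySem.Int.mod p.2 2 = 0 then dc else dc.erase p.1

lemma pvFoldA (l : List (Char × Int)) (f b : List Char) (o dc : PySem.Dict Char Int) :
    l.foldl pvStepA (f, b, o, dc) = (l.foldl pvFF f, l.foldl pvFB b, l.foldl pvFO o, l.foldl pvFD dc) := by
  induction l generalizing f b o dc with
  | nil => rfl
  | cons p t ih => simp only [List.foldl_cons, pvStepA, pvFF, pvFB, pvFO, pvFD, ih]

-- the two components of A's second (fix-up) loop
def pvF2F (f : List Char) (p : Char × Int) : List Char :=
  if 2 < p.2 then pvRep (PySem.Int.floordiv (p.2 - 1) 2) p.1 ++ f else f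
def pvF2B (b : List Char) (p : Char × Int) : List Char :=
  if 2 < p.2 then b ++ pvRep (PySem.Int.floordiv (p.2 - 1) 2) p.1 else b

lemma pvFold2 (l : List (Char × Int)) (fb : List Char × List Char) :
    l.foldl (fun (fb : List Char × List Char) p =>
        (if 2 < p.2 then pvRep (PySem.Int.floordiv (p.2 - 1) 2) p.1 ++ fb.1 else fb.1,
         if 2 < p.2 then fb.2 ++ pvRep (PySem.Int.floordiv (p.2 - 1) 2) p.1 else fb.2)) fb
      = (l.foldl pvF2F fb.1, l.foldl pvF2B fb.2) := by
  induction l generalizing fb with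
  | nil => rfl
  | cons p t ih => simp only [List.foldl_cons, pvF2F, pvF2B, ih]

-- per-element length weights of the two loops
def pvWEven (p : Char × Int) : Nat :=
  if PySem.Int.mod p.2 2 = 0 then (PySem.Int.floordiv p.2 2).toNat else 0
def pvW2 (p : Char × Int) : Nat :=
  if 2 < p.2 then (PySem.Int.floordiv (p.2 - 1) 2).toNat else 0
def pvOddTest (p : Char × Int) : Bool := !decide (PySem.Int.mod p.2 2 = 0)
def pvHA (p : Char × Int) : Int :=
  if PySem.Int.mod p.2 2 = 0 then PySem.Int.floordiv p.2 2 else 0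

lemma pvLenFF (l : List (Char × Int)) (f : List Char) :
    (l.foldl pvFF f).length = f.length + (l.map pvWEven).sum := by
  induction l generalizing f with
  | nil => simp
  | cons p t ih =>
    simp only [List.foldl_cons, List.map_cons, List.sum_cons, pvFF, pvWEven]
    split_ifs with h <;> simp [ih, pvRep] <;> omega

lemma pvLenFB (l : List (Char × Int)) (b : List Char) :
    (l.foldl pvFB b).length = b.length + (l.map pvWEven).sum := by
  induction l generalizing b with
  | nil => simp
  | cons p t ih =>
    simp only [List.foldl_cons, List.map_cons, List.sum_cons, pvFB, pvWEven]
    split_ifs with h <;> simp [ih, pvRep] <;> omega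

lemma pvLen2F (l : List (Char × Int)) (f : List Char) :
    (l.foldl pvF2F f).length = f.length + (l.map pvW2).sum := by
  induction l generalizing f with
  | nil => simp
  | cons p t ih =>
    simp only [List.foldl_cons, List.map_cons, List.sum_cons, pvF2F, pvW2]
    split_ifs with h <;> simp [ih, pvRep] <;> omega

lemma pvLen2B (l : List (Char × Int)) (b : List Char) :
    (l.foldl pvF2B b).length = b.length + (l.map pvW2).sum := by
  induction l generalizing b with
  | nil => simp
  | cons p t ih =>
    simp only [List.foldl_cons, List.map_cons, List.sum_cons, pvF2B, pvW2]
    split_ifs with h <;> simp [ih, pvRep] <;> omega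

lemma pvItemsFO (l : List (Char × Int)) (o : PySem.Dict Char Int)
    (h : (o.items.map Prod.fst ++ l.map Prod.fst).Nodup) :
    (l.foldl pvFO o).items = o.items ++ l.filter pvOddTest := by
  induction l generalizing o with
  | nil => simp
  | cons p t ih =>
    by_cases he : PySem.Int.mod p.2 2 = 0
    · have hodd : pvOddTest p = false := by
        simp only [pvOddTest, he, decide_true, Bool.not_true]
      rw [List.foldl_cons]
      simp only [pvFO]
      rw [if_pos he,
        ih o (h.sublist (((List.sublist_cons_self _ _).map Prod.fst).append_left _)),
        List.filter_cons, hodd]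
      simp
    · have hodd : pvOddTest p = true := by
        simp only [pvOddTest, decide_eq_false he, Bool.not_false]
      have hfresh : o.contains p.1 = false := by
        rw [← Bool.not_eq_true, PySem.Dict.contains_iff_mem_keys]
        intro hk
        have h1 : p.1 ∈ o.items.map Prod.fst := by simpa [PySem.Dict.keys] using hk
        have h2 : p.1 ∈ (p :: t).map Prod.fst := List.mem_map_of_mem List.mem_cons_self
        exact List.disjoint_of_nodup_append h h1 h2
      rw [List.foldl_cons]
      simp only [pvFO]
      rw [if_neg he,
        ih (o.insert p.1 p.2) (by
          rw [PySem.Dict.items_insert_of_not_contains o p.2 hfresh]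
          simp only [List.map_cons] at h
          rw [List.append_cons] at h
          simpa using h),
        PySem.Dict.items_insert_of_not_contains o p.2 hfresh,
        List.filter_cons, hodd]
      simp

-- the argmax loop computed with dict lookups equals the plain pair fold
def pvAmax (t : List (Char × Int)) (a : Char × Int) : Char × Int :=
  t.foldl (fun a p => if a.2 < p.2 then p else a) a

lemma pvArgmaxEq (dct : PySem.Dict Char Int) (t : List (Char × Int))
    (hmem : ∀ p ∈ t, dct.getD p.1 0 = p.2) (a : Char × Int) (ha : dct.getD a.1 0 = a.2) :
    t.foldl (fun fk p => if dct.getD fk 0 < p.2 then p.1 else fk) a.1 = (pvAmax t a).1 ∧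
      dct.getD (pvAmax t a).1 0 = (pvAmax t a).2 := by
  induction t generalizing a with
  | nil => exact ⟨rfl, ha⟩
  | cons p t ih =>
    simp only [pvAmax, List.foldl_cons, ha]
    by_cases hlt : a.2 < p.2
    · simp only [if_pos hlt]
      exact ih (fun q hq => hmem q (by simp [hq])) p (hmem p (by simp))
    · simp only [if_neg hlt]
      exact ih (fun q hq => hmem q (by simp [hq])) a ha

lemma pvAmaxMem (t : List (Char × Int)) (a : Char × Int) : pvAmax t a = a ∨ pvAmax t a ∈ t := by
  induction t generalizing a with
  | nil => exact Or.inl rfl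
  | cons p t ih =>
    have hstep : pvAmax (p :: t) a = pvAmax t (if a.2 < p.2 then p else a) := by
      simp only [pvAmax, List.foldl_cons]
    rw [hstep]
    by_cases hlt : a.2 < p.2
    · rw [if_pos hlt]
      rcases ih p with h | h
      · exact Or.inr (by rw [h]; exact List.mem_cons_self)
      · exact Or.inr (List.mem_cons_of_mem _ h)
    · rw [if_neg hlt]
      rcases ih a with h | h
      · exact Or.inl h
      · exact Or.inr (List.mem_cons_of_mem _ h)

-- with pairwise-distinct keys, erasing a member's key removes exactly that pair
lemma pvErasePerm (l : List (Char × Int)) (r : Char × Int)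
    (hnd : (l.map Prod.fst).Nodup) (hr : r ∈ l) :
    l.Perm (r :: l.filter (fun p => !(p.1 == r.1))) := by
  induction l with
  | nil => cases hr
  | cons p t ih =>
    simp only [List.map_cons, List.nodup_cons] at hnd
    rcases List.mem_cons.mp hr with rfl | hrt
    · have hall : ∀ q ∈ t, (!(q.1 == r.1)) = true := by
        intro q hq
        simp only [Bool.not_eq_eq_eq_not, Bool.not_true, beq_eq_false_iff_ne]
        intro hqr; exact hnd.1 (hqr ▸ List.mem_map_of_mem hq)
      simp [List.filter_cons, (List.filter_congr hall).trans (List.filter_true t)]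
    · have hne : (!(p.1 == r.1)) = true := by
        simp only [Bool.not_eq_eq_eq_not, Bool.not_true, beq_eq_false_iff_ne]
        intro hpr; exact hnd.1 (hpr ▸ List.mem_map_of_mem hrt)
      simp only [List.filter_cons, hne, if_pos]
      exact ((ih hnd.2 hrt).cons p).trans (List.Perm.swap _ _ _)

-- cast a Nat weight sum to an Int weight sum, elementwise
lemma pvSumCast (l : List (Char × Int)) (g : Char × Int → Nat) (h : Char × Int → Int)
    (hc : ∀ p ∈ l, (g p : Int) = h p) : ((l.map g).sum : Int) = (l.map h).sum := by
  induction l with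
  | nil => simp
  | cons p t ih =>
    simp only [List.map_cons, List.sum_cons, Nat.cast_add, hc p List.mem_cons_self,
      ih (fun q hq => hc q (List.mem_cons_of_mem _ hq))]

-- split the //2 sum into its even part and its odd part
lemma pvSumSplit (l : List (Char × Int)) :
    (l.map (fun p => PySem.Int.floordiv p.2 2)).sum
      = (l.map pvHA).sum + ((l.filter pvOddTest).map (fun p => PySem.Int.floordiv p.2 2)).sum := by
  induction l with
  | nil => simp
  | cons p t ih =>
    by_cases he : PySem.Int.mod p.2 2 = 0
    · have hodd : pvOddTest p = false := by
        simp only [pvOddTest, he, decide_true, Bool.not_true]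
      simp only [List.map_cons, List.sum_cons, List.filter_cons, hodd, pvHA, if_pos he, ih]
      simp; ring
    · have hodd : pvOddTest p = true := by
        simp only [pvOddTest, decide_eq_false he, Bool.not_false]
      simp only [List.map_cons, List.sum_cons, List.filter_cons, hodd, pvHA, if_neg he, ih]
      simp; ring

lemma pvTestEq (v : Int) : (PySem.Int.mod v 2 != 0) = !decide (PySem.Int.mod v 2 = 0) := by
  by_cases h : PySem.Int.mod v 2 = 0
  · rw [h]; decide
  · have h1 : (PySem.Int.mod v 2 != 0) = true := by simpa using h
    rw [h1, decide_eq_false h]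
    rfl

lemma pvOddVal (y : Int) (h1 : 1 ≤ y) (h2 : ¬ PySem.Int.mod y 2 = 0) :
    2 * PySem.Int.floordiv y 2 + 1 = y ∧ ((y.toNat : Int)) = y := by
  rw [PySem.Int.floordiv_eq_ediv_of_pos (by norm_num)]
  rw [PySem.Int.mod_eq_emod_of_pos (by norm_num)] at h2
  omega

lemma pvW2Val (p : Char × Int) (h1 : 1 ≤ p.2) (h2 : ¬ PySem.Int.mod p.2 2 = 0) :
    ((pvW2 p : Nat) : Int) = PySem.Int.floordiv p.2 2 := by
  unfold pvW2
  rw [PySem.Int.mod_eq_emod_of_pos (by norm_num)] at h2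
  split_ifs with h
  · rw [PySem.Int.floordiv_eq_ediv_of_pos (by norm_num),
      PySem.Int.floordiv_eq_ediv_of_pos (by norm_num)]
    omega
  · rw [PySem.Int.floordiv_eq_ediv_of_pos (by norm_num)]
    omega

lemma pvWEvenVal (p : Char × Int) (h1 : 1 ≤ p.2) : ((pvWEven p : Nat) : Int) = pvHA p := by
  unfold pvWEven pvHA
  split_ifs with h
  · rw [PySem.Int.floordiv_eq_ediv_of_pos (by norm_num)]; omega
  · rfl

-- ===== VERDICT (by name: the statement is the Claim_ definition above) =====
set_option maxHeartbeats 1000000 in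
theorem longestPalindrome2_spec : Claim_equal_longestPalindrome2 := by
  intro s _
  show longestPalindrome2 s = longestPalindrome2_alt s
  have hnd : (((PySem.Dict.counter s.toList).items).map Prod.fst).Nodup := by
    rw [PySem.Dict.items_counter]
    have h2 : (List.map (fun k : Char => (k, (s.toList.count k : Int))) (PySem.Set.ofList s.toList)).map Prod.fst = PySem.Set.ofList s.toList := by
      simp [Function.comp_def]
    rw [h2]
    exact PySem.Set.nodup_ofList s.toList
  have hpos : ∀ p ∈ ((PySem.Dict.counter s.toList).items), 1 ≤ p.2 := by
    rw [PySem.Dict.items_counter]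
    intro p hp
    obtain ⟨k, hk, rfl⟩ := List.mem_map.mp hp
    have hmem : k ∈ s.toList := (PySem.Set.mem_ofList _ _).mp hk
    have hcnt := List.count_pos_iff.mpr hmem
    simp only
    omega
  have hoddItems : (((PySem.Dict.counter s.toList).items).foldl pvFO PySem.Dict.empty).items = ((PySem.Dict.counter s.toList).items).filter pvOddTest := by
    have := pvItemsFO ((PySem.Dict.counter s.toList).items) PySem.Dict.empty (by simpa using hnd)
    simpa using this
  have hOsub : ∀ p ∈ ((PySem.Dict.counter s.toList).items).filter pvOddTest, p ∈ ((PySem.Dict.counter s.toList).items) := fun p hp => List.mem_of_mem_filter hp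
  have hOodd : ∀ p ∈ ((PySem.Dict.counter s.toList).items).filter pvOddTest, ¬ PySem.Int.mod p.2 2 = 0 := by
    intro p hp
    have := List.of_mem_filter hp
    simpa [pvOddTest] using this
  have hOnd : ((((PySem.Dict.counter s.toList).items).filter pvOddTest).map Prod.fst).Nodup :=
    hnd.sublist (List.Sublist.map Prod.fst List.filter_sublist)
  have hknd : (((PySem.Dict.counter s.toList).items).foldl pvFO PySem.Dict.empty).keys.Nodup := by
    simpa [PySem.Dict.keys, hoddItems] using hOnd
  have hget : ∀ p ∈ ((PySem.Dict.counter s.toList).items).filter pvOddTest, (((PySem.Dict.counter s.toList).items).foldl pvFO PySem.Dict.empty).getD p.1 0 = p.2 :=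
    fun p hp => PySem.Dict.getD_of_mem_items _ (by rw [hoddItems]; exact hp) hknd 0
  have hSE : (((((PySem.Dict.counter s.toList).items).map pvWEven).sum : Nat) : Int) = (((PySem.Dict.counter s.toList).items).map pvHA).sum :=
    pvSumCast ((PySem.Dict.counter s.toList).items) pvWEven pvHA (fun p hp => pvWEvenVal p (hpos p hp))
  have hanyL : ((((PySem.Dict.counter s.toList).items).map (fun x : Char × Int => x.2)).any (fun v => PySem.Int.mod v 2 != 0))
      = ((PySem.Dict.counter s.toList).items).any pvOddTest := by
    rw [List.any_map]
    exact PySem.List.any_congr_mem (fun x _ => by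
      simpa [Function.comp, pvOddTest] using pvTestEq x.2)
  have hcomp : (List.map (fun v => PySem.Int.floordiv v 2) (List.map (fun x : Char × Int => x.2) ((PySem.Dict.counter s.toList).items)))
      = ((PySem.Dict.counter s.toList).items).map (fun p => PySem.Int.floordiv p.2 2) := by
    rw [List.map_map]; rfl
  have hsize : (((PySem.Dict.counter s.toList).items).foldl pvFO PySem.Dict.empty).size = (((PySem.Dict.counter s.toList).items).filter pvOddTest).length := by
    simp [PySem.Dict.size, hoddItems]
  simp only [longestPalindrome2, longestPalindrome2_alt, pvFoldA, PySem.Dict.values]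
  simp only [hanyL, hcomp, hsize]
  by_cases hsz : (((PySem.Dict.counter s.toList).items).filter pvOddTest).length ≤ 1
  · rw [if_pos hsz]
    rcases hC : ((PySem.Dict.counter s.toList).items).filter pvOddTest with _ | ⟨q, t⟩
    · have hall : ∀ p ∈ ((PySem.Dict.counter s.toList).items), pvOddTest p = false := by
        intro p hp
        by_contra hne
        have hpm : p ∈ ((PySem.Dict.counter s.toList).items).filter pvOddTest :=
          List.mem_filter.mpr ⟨hp, by simpa using hne⟩
        rw [hC] at hpm
        cases hpm
      have hanyF : ((PySem.Dict.counter s.toList).items).any pvOddTest = false := by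
        rw [List.any_eq_false]
        intro p hp
        simp [hall p hp]
      rw [hoddItems, hC, pvSumSplit ((PySem.Dict.counter s.toList).items), hC, if_neg (by simp [hanyF])]
      simp only [List.length_append, List.foldl_nil, List.length_nil, List.map_nil,
        List.sum_nil]
      rw [pvLenFF, pvLenFB]
      simp only [List.length_nil]
      push_cast [hSE]
      omega
    · have ht : t = [] := by
        rw [hC] at hsz
        simp only [List.length_cons] at hsz
        exact List.length_eq_zero_iff.mp (by omega)
      subst ht
      have hqOL : q ∈ ((PySem.Dict.counter s.toList).items).filter pvOddTest := by rw [hC]; exact List.mem_cons_self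
      have hq1 : 1 ≤ q.2 := hpos q (hOsub q hqOL)
      have hq2 : ¬ PySem.Int.mod q.2 2 = 0 := hOodd q hqOL
      have hanyT : ((PySem.Dict.counter s.toList).items).any pvOddTest = true := by
        rw [List.any_eq_true]
        exact ⟨q, hOsub q hqOL, by simpa [pvOddTest] using hq2⟩
      rw [hoddItems, hC, pvSumSplit ((PySem.Dict.counter s.toList).items), hC, if_pos hanyT]
      simp only [List.length_append, List.foldl_cons, List.foldl_nil, List.nil_append,
        List.map_cons, List.map_nil, List.sum_cons, List.sum_nil, pvRep, List.length_replicate]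
      rw [pvLenFF, pvLenFB]
      simp only [List.length_nil]
      obtain ⟨hv1, hv2⟩ := pvOddVal q.2 hq1 hq2
      push_cast [hSE]
      omega
  · rw [if_neg hsz]
    rcases hC : ((PySem.Dict.counter s.toList).items).filter pvOddTest with _ | ⟨q, t⟩
    · rw [hC] at hsz; simp at hsz
    have hqOL : q ∈ ((PySem.Dict.counter s.toList).items).filter pvOddTest := by rw [hC]; exact List.mem_cons_self
    have hhead : ((((PySem.Dict.counter s.toList).items).foldl pvFO PySem.Dict.empty).keys).headD ' ' = q.1 := by
      simp [PySem.Dict.keys, hoddItems, hC]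
    rw [hoddItems, hhead]
    obtain ⟨hfold1, hlook⟩ :=
      pvArgmaxEq (((PySem.Dict.counter s.toList).items).foldl pvFO PySem.Dict.empty) (((PySem.Dict.counter s.toList).items).filter pvOddTest) hget q (hget q hqOL)
    rw [hfold1, hlook]
    have hrOL : pvAmax (((PySem.Dict.counter s.toList).items).filter pvOddTest) q ∈ ((PySem.Dict.counter s.toList).items).filter pvOddTest := by
      rcases pvAmaxMem (((PySem.Dict.counter s.toList).items).filter pvOddTest) q with h | h
      · rw [h]; exact hqOL
      · exact h
    have hr1 : 1 ≤ (pvAmax (((PySem.Dict.counter s.toList).items).filter pvOddTest) q).2 := hpos _ (hOsub _ hrOL)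
    have hr2 : ¬ PySem.Int.mod (pvAmax (((PySem.Dict.counter s.toList).items).filter pvOddTest) q).2 2 = 0 := hOodd _ hrOL
    have hErase : ((((PySem.Dict.counter s.toList).items).foldl pvFO PySem.Dict.empty).erase (pvAmax (((PySem.Dict.counter s.toList).items).filter pvOddTest) q).1).items
        = (((PySem.Dict.counter s.toList).items).filter pvOddTest).filter (fun p => !(p.1 == (pvAmax (((PySem.Dict.counter s.toList).items).filter pvOddTest) q).1)) := by
      rw [show ((((PySem.Dict.counter s.toList).items).foldl pvFO PySem.Dict.empty).erase (pvAmax (((PySem.Dict.counter s.toList).items).filter pvOddTest) q).1).items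
            = (((PySem.Dict.counter s.toList).items).foldl pvFO PySem.Dict.empty).items.filter
                (fun p => !(p.1 == (pvAmax (((PySem.Dict.counter s.toList).items).filter pvOddTest) q).1)) from rfl,
          hoddItems]
    rw [hErase, pvFold2]
    simp only [pvLen2F, pvLen2B, pvLenFF, pvLenFB, List.length_append, List.length_nil,
      List.nil_append, pvRep, List.length_replicate]
    have hperm : (((PySem.Dict.counter s.toList).items).filter pvOddTest).Perm
        (pvAmax (((PySem.Dict.counter s.toList).items).filter pvOddTest) q ::
          (((PySem.Dict.counter s.toList).items).filter pvOddTest).filter (fun p => !(p.1 == (pvAmax (((PySem.Dict.counter s.toList).items).filter pvOddTest) q).1))) :=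
      pvErasePerm _ _ hOnd hrOL
    have hpermsum : (((((PySem.Dict.counter s.toList).items).filter pvOddTest).map (fun p => PySem.Int.floordiv p.2 2)).sum : Int)
        = PySem.Int.floordiv (pvAmax (((PySem.Dict.counter s.toList).items).filter pvOddTest) q).2 2
          + (((((PySem.Dict.counter s.toList).items).filter pvOddTest).filter
                (fun p => !(p.1 == (pvAmax (((PySem.Dict.counter s.toList).items).filter pvOddTest) q).1))).map
              (fun p => PySem.Int.floordiv p.2 2)).sum := by
      rw [(hperm.map (fun p => PySem.Int.floordiv p.2 2)).sum_eq]
      simp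
    have hEsum : (((((((PySem.Dict.counter s.toList).items).filter pvOddTest).filter
            (fun p => !(p.1 == (pvAmax (((PySem.Dict.counter s.toList).items).filter pvOddTest) q).1))).map pvW2).sum : Nat) : Int)
        = (((((PySem.Dict.counter s.toList).items).filter pvOddTest).filter
              (fun p => !(p.1 == (pvAmax (((PySem.Dict.counter s.toList).items).filter pvOddTest) q).1))).map
            (fun p => PySem.Int.floordiv p.2 2)).sum :=
      pvSumCast _ pvW2 (fun p => PySem.Int.floordiv p.2 2) (fun p hp => by
        have hpOL : p ∈ ((PySem.Dict.counter s.toList).items).filter pvOddTest := List.mem_of_mem_filter hp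
        exact pvW2Val p (hpos p (hOsub p hpOL)) (hOodd p hpOL))
    have hanyT : ((PySem.Dict.counter s.toList).items).any pvOddTest = true := by
      rw [List.any_eq_true]
      exact ⟨q, hOsub q hqOL, by simpa [pvOddTest] using hOodd q hqOL⟩
    rw [pvSumSplit ((PySem.Dict.counter s.toList).items), if_pos hanyT]
    obtain ⟨hv1, hv2⟩ := pvOddVal (pvAmax (((PySem.Dict.counter s.toList).items).filter pvOddTest) q).2 hr1 hr2
    push_cast [hSE, hEsum, hpermsum]
    omega
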